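-- pv_equiv track=rewrite | github.com/ParaDhim/own | svm.py | enhanced_extract_features
-- ===== SOURCE A (Python) =====
-- def enhanced_extract_features(ciphertext1, ciphertext2):
--     """Enhanced feature extraction with more sophisticated differential patterns"""
--     features = []
--
--     # Extract full 16-bit difference
--     full_diff = ciphertext1 ^ ciphertext2
--     features.append(full_diff)
--
--     # Extract nibble differences with position weights
--     for i in range(4):
--         nibble1 = (ciphertext1 >> (i * 4)) & 0xF
--         nibble2 = (ciphertext2 >> (i * 4)) & 0xF
--         diff = nibble1 ^ nibble2
--         features.append(diff)
--
--         # Add Hamming weight of the difference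
--         hw = bin(diff).count('1')
--         features.append(hw)
--
--         # Add position-weighted difference
--         features.append(diff * (i + 1))
--
--     # Add bit-level differences with position information
--     for pos in range(16):
--         bit1 = (ciphertext1 >> pos) & 1
--         bit2 = (ciphertext2 >> pos) & 1
--         bit_diff = bit1 ^ bit2
--         features.append(bit_diff)
--
--         # Add position-weighted bit difference
--         features.append(bit_diff * (pos + 1))
--
--     # Add sliding window patterns (2-bit and 3-bit windows)
--     for pos in range(15):
--         window1_2bit = (ciphertext1 >> pos) & 0x3
--         window2_2bit = (ciphertext2 >> pos) & 0x3
--         features.append(window1_2bit ^ window2_2bit)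
--
--     for pos in range(14):
--         window1_3bit = (ciphertext1 >> pos) & 0x7
--         window2_3bit = (ciphertext2 >> pos) & 0x7
--         features.append(window1_3bit ^ window2_3bit)
--
--     # Add correlation features
--     for i in range(4):
--         for j in range(i + 1, 4):
--             nibble1_i = (ciphertext1 >> (i * 4)) & 0xF
--             nibble2_i = (ciphertext2 >> (i * 4)) & 0xF
--             nibble1_j = (ciphertext1 >> (j * 4)) & 0xF
--             nibble2_j = (ciphertext2 >> (j * 4)) & 0xF
--             features.append((nibble1_i ^ nibble2_i) & (nibble1_j ^ nibble2_j))
--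
--     return features
-- ===== SOURCE B (Python) =====
-- def enhanced_extract_features(ciphertext1, ciphertext2):
--     """Bit-table algorithm: xor once, peel the 16 low bits of the difference into a
--     table by repeated divmod, then assemble every feature arithmetically from that
--     table (Horner reconstruction for windows, bit sums for Hamming weights,
--     bit products for correlations) -- no shifts or masks anywhere."""
--     d = ciphertext1 ^ ciphertext2
--     bits = []
--     m = d % 65536
--     for _ in range(16):
--         bits.append(m % 2)
--         m //= 2
--
--     def val(chunk):
--         # value of an LSB-first bit list, Horner from the top bit down
--         v = 0
--         for b in reversed(chunk):
--             v = 2 * v + b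
--         return v
--
--     feats = [d]
--     chunks = [bits[4 * i: 4 * i + 4] for i in range(4)]
--     for i, ch in enumerate(chunks):
--         v = val(ch)
--         feats += [v, sum(ch), v * (i + 1)]
--     for p, b in enumerate(bits):
--         feats += [b, b * (p + 1)]
--     for p in range(15):
--         feats.append(val(bits[p: p + 2]))
--     for p in range(14):
--         feats.append(val(bits[p: p + 3]))
--     for k, ci in enumerate(chunks):
--         for cj in chunks[k + 1:]:
--             feats.append(val([x * y for x, y in zip(ci, cj)]))
--     return feats
-- ===== Notes on version B (the rewrite author's own statement) =====
-- stated objective: alternative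
-- what changed: B xors the ciphertexts once, peels the 16 low bits of the difference into a table by repeated divmod, and assembles every feature arithmetically from that table (Horner reconstruction of nibble/window values, Hamming weight as a bit sum, correlations as sums of bit products), whereas A recomputes shift-and-mask windows on both ciphertexts and xors them per feature.
import Mathlib
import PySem

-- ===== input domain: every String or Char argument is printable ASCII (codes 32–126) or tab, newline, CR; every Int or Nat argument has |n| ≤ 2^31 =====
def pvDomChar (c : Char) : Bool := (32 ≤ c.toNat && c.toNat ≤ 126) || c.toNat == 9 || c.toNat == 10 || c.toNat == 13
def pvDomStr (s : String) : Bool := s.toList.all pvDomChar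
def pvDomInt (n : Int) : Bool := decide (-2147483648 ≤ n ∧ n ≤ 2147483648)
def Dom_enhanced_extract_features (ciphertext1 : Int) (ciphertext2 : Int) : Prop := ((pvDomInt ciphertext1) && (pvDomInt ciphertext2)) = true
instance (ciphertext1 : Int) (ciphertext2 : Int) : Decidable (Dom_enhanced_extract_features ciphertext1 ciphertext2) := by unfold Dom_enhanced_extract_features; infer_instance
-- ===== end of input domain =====

-- B xors once, peels the 16 low bits of the difference into a table by repeated
-- divmod, and assembles every feature arithmetically from that table (Horner
-- reconstruction, bit sums, bit products) with no shifts or masks (alternative).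
-- ===== PORT A =====
def enhanced_extract_features (ciphertext1 : Int) (ciphertext2 : Int) : List Int :=
  let features : List Int := []
  let full_diff := PySem.Int.bxor ciphertext1 ciphertext2
  let features := features ++ [full_diff]
  let features := (PySem.List.pyRange 0 4 1).foldl (fun features i =>
    let nibble1 := PySem.Int.band (Int.shiftRight ciphertext1 (i * 4).toNat) 0xF
    let nibble2 := PySem.Int.band (Int.shiftRight ciphertext2 (i * 4).toNat) 0xF
    let diff := PySem.Int.bxor nibble1 nibble2
    let features := features ++ [diff]
    let hw : Int := (PySem.Str.count (PySem.Int.pyBin diff) "1" : Int)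
    let features := features ++ [hw]
    features ++ [diff * (i + 1)]) features
  let features := (PySem.List.pyRange 0 16 1).foldl (fun features pos =>
    let bit1 := PySem.Int.band (Int.shiftRight ciphertext1 pos.toNat) 1
    let bit2 := PySem.Int.band (Int.shiftRight ciphertext2 pos.toNat) 1
    let bit_diff := PySem.Int.bxor bit1 bit2
    let features := features ++ [bit_diff]
    features ++ [bit_diff * (pos + 1)]) features
  let features := (PySem.List.pyRange 0 15 1).foldl (fun features pos =>
    let window1_2bit := PySem.Int.band (Int.shiftRight ciphertext1 pos.toNat) 0x3
    let window2_2bit := PySem.Int.band (Int.shiftRight ciphertext2 pos.toNat) 0x3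
    features ++ [PySem.Int.bxor window1_2bit window2_2bit]) features
  let features := (PySem.List.pyRange 0 14 1).foldl (fun features pos =>
    let window1_3bit := PySem.Int.band (Int.shiftRight ciphertext1 pos.toNat) 0x7
    let window2_3bit := PySem.Int.band (Int.shiftRight ciphertext2 pos.toNat) 0x7
    features ++ [PySem.Int.bxor window1_3bit window2_3bit]) features
  let features := (PySem.List.pyRange 0 4 1).foldl (fun features i =>
    (PySem.List.pyRange (i + 1) 4 1).foldl (fun features j =>
      let nibble1_i := PySem.Int.band (Int.shiftRight ciphertext1 (i * 4).toNat) 0xF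
      let nibble2_i := PySem.Int.band (Int.shiftRight ciphertext2 (i * 4).toNat) 0xF
      let nibble1_j := PySem.Int.band (Int.shiftRight ciphertext1 (j * 4).toNat) 0xF
      let nibble2_j := PySem.Int.band (Int.shiftRight ciphertext2 (j * 4).toNat) 0xF
      features ++ [PySem.Int.band (PySem.Int.bxor nibble1_i nibble2_i) (PySem.Int.bxor nibble1_j nibble2_j)]) features) features
  features

-- ===== PORT B =====
-- helper 'val' of Source B: value of an LSB-first bit list, Horner from the top bit down
def pvVal (chunk : List Int) : Int :=
  chunk.reverse.foldl (fun v b => 2 * v + b) 0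

def enhanced_extract_features_alt (ciphertext1 : Int) (ciphertext2 : Int) : List Int :=
  let d := PySem.Int.bxor ciphertext1 ciphertext2
  let st := (PySem.List.pyRange 0 16 1).foldl (fun (st : List Int × Int) _ =>
      (st.1 ++ [PySem.Int.mod st.2 2], PySem.Int.floordiv st.2 2)) ([], PySem.Int.mod d 65536)
  let bits := st.1
  let feats : List Int := [d]
  let chunks := (PySem.List.pyRange 0 4 1).map (fun i =>
      PySem.List.slice bits (some (4 * i)) (some (4 * i + 4)))
  let feats := (PySem.List.enumerate chunks).foldl (fun feats (p : Int × List Int) =>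
      let v := pvVal p.2
      feats ++ [v, p.2.foldl (· + ·) 0, v * (p.1 + 1)]) feats
  let feats := (PySem.List.enumerate bits).foldl (fun feats (p : Int × Int) =>
      feats ++ [p.2, p.2 * (p.1 + 1)]) feats
  let feats := (PySem.List.pyRange 0 15 1).foldl (fun feats p =>
      feats ++ [pvVal (PySem.List.slice bits (some p) (some (p + 2)))]) feats
  let feats := (PySem.List.pyRange 0 14 1).foldl (fun feats p =>
      feats ++ [pvVal (PySem.List.slice bits (some p) (some (p + 3)))]) feats
  let feats := (PySem.List.enumerate chunks).foldl (fun feats (p : Int × List Int) =>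
      (PySem.List.slice chunks (some (p.1 + 1)) none).foldl (fun feats cj =>
        feats ++ [pvVal ((p.2.zip cj).map (fun q => q.1 * q.2))]) feats) feats
  feats

-- ===== PRECONDITION & SPEC =====
def Spec_enhanced_extract_features (ciphertext1 : Int) (ciphertext2 : Int) (out : List Int) : Prop := out = enhanced_extract_features_alt ciphertext1 ciphertext2
instance (ciphertext1 : Int) (ciphertext2 : Int) (out : List Int) : Decidable (Spec_enhanced_extract_features ciphertext1 ciphertext2 out) := by unfold Spec_enhanced_extract_features; infer_instance

-- ===== CLAIM (what is proved, stated in full; the proofs are below) =====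
def Claim_equal_enhanced_extract_features : Prop := ∀ (ciphertext1 : Int) (ciphertext2 : Int), Dom_enhanced_extract_features ciphertext1 ciphertext2 → Spec_enhanced_extract_features ciphertext1 ciphertext2 (enhanced_extract_features ciphertext1 ciphertext2)

-- ===== LEMMAS AND PROOFS =====

-- (negSucc m) mod 2^j, as a Nat literal
lemma emod_negSucc_two_pow (m : Nat) (j : Nat) :
    (Int.negSucc m).emod (2 ^ j) = ((2 ^ j - 1 - m % 2 ^ j : Nat) : Int) := by
  have hM : (0:Int) < 2 ^ j := by positivity
  have hmodN : m % 2 ^ j < 2 ^ j := Nat.mod_lt _ (by positivity)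
  have hmod : ((m % 2 ^ j : Nat) : Int) < 2 ^ j := by exact_mod_cast hmodN
  have hmod0 : (0:Int) ≤ ((m % 2 ^ j : Nat) : Int) := Int.natCast_nonneg _
  have hdecomp : (Int.negSucc m) = (-(↑(m % 2 ^ j)) - 1) + (2 ^ j) * (-(↑(m / 2 ^ j))) := by
    rw [Int.negSucc_eq]
    have : (m : Int) = 2 ^ j * (m / 2 ^ j : Nat) + (m % 2 ^ j : Nat) := by
      exact_mod_cast congrArg (Nat.cast : Nat → Int) (Nat.div_add_mod m (2 ^ j)).symm
    push_cast at this ⊢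
    linarith
  rw [show ∀ x y : Int, x.emod y = x % y from fun _ _ => rfl]
  rw [hdecomp, Int.add_mul_emod_self_left]
  calc (-(↑(m % 2 ^ j)) - 1) % ((2:Int) ^ j)
      = (-(↑(m % 2 ^ j)) - 1 + 2 ^ j) % ((2:Int) ^ j) := by rw [Int.add_emod_right]
    _ = -(↑(m % 2 ^ j)) - 1 + 2 ^ j := Int.emod_eq_of_lt (by linarith) (by linarith)
    _ = ((2 ^ j - 1 - m % 2 ^ j : Nat) : Int) := by
        have h1 : (1:Nat) ≤ 2 ^ j := Nat.one_le_two_pow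
        rw [Nat.sub_sub, Nat.cast_sub (by omega)]
        push_cast; ring

-- Python '& (2^j - 1)' is emod 2^j
lemma band_mask (a : Int) (j : Nat) :
    PySem.Int.band a ((2 ^ j : Int) - 1) = a.emod (2 ^ j) := by
  have h1 : (1:Nat) ≤ 2 ^ j := Nat.one_le_two_pow
  have hcast : ((2 ^ j : Int) - 1) = ((2 ^ j - 1 : Nat) : Int) := by
    rw [Nat.cast_sub h1]; push_cast; ring
  have hnn : (0:Int) ≤ (2 ^ j : Int) - 1 := by rw [hcast]; exact Int.natCast_nonneg _
  rcases a with m | m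
  · rw [PySem.Int.band]
    simp only [Int.ofNat_eq_natCast, Int.natCast_nonneg, if_pos, Int.toNat_natCast, hcast]
    rw [Nat.and_two_pow_sub_one_eq_mod]
    exact_mod_cast Int.neg_inj.mp rfl
  · rw [PySem.Int.band]
    have hneg : ¬ (0:Int) ≤ Int.negSucc m := by exact of_decide_eq_false rfl
    simp only [hneg, if_neg, hnn, if_pos, not_false_iff]
    rw [hcast, Int.toNat_natCast]
    have : (-(Int.negSucc m) - 1).toNat = m := by rw [Int.negSucc_eq]; omega
    rw [this, Nat.and_comm, Nat.and_two_pow_sub_one_eq_mod, emod_negSucc_two_pow]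

-- low-bits complement: subtracting from the all-ones mask is xor with it
lemma mask_sub_eq_xor (j : Nat) : ∀ y : Nat, y < 2 ^ j → 2 ^ j - 1 - y = (2 ^ j - 1) ^^^ y := by
  induction j with
  | zero => intro y hy; interval_cases y; rfl
  | succ j ih =>
    intro y hy
    have hy2 : y / 2 < 2 ^ j := by omega
    have h1 : ((2 ^ (j + 1) - 1) ^^^ y) / 2 = 2 ^ j - 1 - y / 2 := by
      rw [Nat.xor_div_two, show (2 ^ (j + 1) - 1) / 2 = 2 ^ j - 1 by omega, ← ih _ hy2]
    have h2 : ((2 ^ (j + 1) - 1) ^^^ y) % 2 = (2 ^ (j + 1) - 1 + y) % 2 := Nat.xor_mod_two_eq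
    omega

lemma natCast_emod (x j : Nat) : ((x % 2 ^ j : Nat) : Int) = (x : Int).emod (2 ^ j) := by
  exact_mod_cast Int.neg_inj.mp rfl

lemma xor_natCast' (p q : Nat) : Int.xor (p : Int) (q : Int) = ((p ^^^ q : Nat) : Int) := rfl

-- emod 2^j distributes over xor
lemma xor_emod (a b : Int) (j : Nat) :
    (Int.xor a b).emod (2 ^ j) = Int.xor (a.emod (2 ^ j)) (b.emod (2 ^ j)) := by
  rcases a with m | m <;> rcases b with n | n
  · show ((m ^^^ n : Nat) : Int).emod (2 ^ j) = Int.xor ((m : Int).emod (2 ^ j)) ((n : Int).emod (2 ^ j))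
    rw [← natCast_emod, ← natCast_emod, ← natCast_emod, xor_natCast', Nat.xor_mod_two_pow]
  · show (Int.negSucc (m ^^^ n)).emod (2 ^ j) = Int.xor ((m : Int).emod (2 ^ j)) ((Int.negSucc n).emod (2 ^ j))
    rw [emod_negSucc_two_pow, emod_negSucc_two_pow, ← natCast_emod, xor_natCast']
    congr 1
    have hx : m % 2 ^ j < 2 ^ j := Nat.mod_lt _ (by positivity)
    have hy : n % 2 ^ j < 2 ^ j := Nat.mod_lt _ (by positivity)
    have hlt : (m % 2 ^ j) ^^^ (n % 2 ^ j) < 2 ^ j := Nat.xor_lt_two_pow hx hy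
    rw [Nat.xor_mod_two_pow, mask_sub_eq_xor j _ hlt, mask_sub_eq_xor j _ hy]
    simp [Nat.xor_comm, Nat.xor_left_comm]
  · show (Int.negSucc (m ^^^ n)).emod (2 ^ j) = Int.xor ((Int.negSucc m).emod (2 ^ j)) ((n : Int).emod (2 ^ j))
    rw [emod_negSucc_two_pow, emod_negSucc_two_pow, ← natCast_emod, xor_natCast']
    congr 1
    have hx : m % 2 ^ j < 2 ^ j := Nat.mod_lt _ (by positivity)
    have hy : n % 2 ^ j < 2 ^ j := Nat.mod_lt _ (by positivity)
    have hlt : (m % 2 ^ j) ^^^ (n % 2 ^ j) < 2 ^ j := Nat.xor_lt_two_pow hx hy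
    rw [Nat.xor_mod_two_pow, mask_sub_eq_xor j _ hlt, mask_sub_eq_xor j _ hx]
    simp [Nat.xor_comm, Nat.xor_left_comm]
  · show ((m ^^^ n : Nat) : Int).emod (2 ^ j) = Int.xor ((Int.negSucc m).emod (2 ^ j)) ((Int.negSucc n).emod (2 ^ j))
    rw [emod_negSucc_two_pow, emod_negSucc_two_pow, ← natCast_emod, xor_natCast']
    congr 1
    have hx : m % 2 ^ j < 2 ^ j := Nat.mod_lt _ (by positivity)
    have hy : n % 2 ^ j < 2 ^ j := Nat.mod_lt _ (by positivity)
    rw [Nat.xor_mod_two_pow, mask_sub_eq_xor j _ hx, mask_sub_eq_xor j _ hy]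
    simp [Nat.xor_comm, Nat.xor_left_comm]

-- PySem.Int.bxor is core Int.xor
lemma bxor_eq_xor (a b : Int) : PySem.Int.bxor a b = Int.xor a b := by
  rcases a with m | m <;> rcases b with n | n <;>
    simp [PySem.Int.bxor, Int.xor, Int.negSucc_eq] <;> omega

-- right shift distributes over xor
lemma xor_shiftRight (a b : Int) (k : Nat) :
    Int.shiftRight (Int.xor a b) k = Int.xor (Int.shiftRight a k) (Int.shiftRight b k) := by
  rcases a with m | m <;> rcases b with n | n
  · show ((((m ^^^ n) >>> k : Nat)) : Int) = (((m >>> k) ^^^ (n >>> k) : Nat) : Int)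
    rw [Nat.shiftRight_xor_distrib]
  · show Int.negSucc ((m ^^^ n) >>> k) = Int.negSucc ((m >>> k) ^^^ (n >>> k))
    rw [Nat.shiftRight_xor_distrib]
  · show Int.negSucc ((m ^^^ n) >>> k) = Int.negSucc ((m >>> k) ^^^ (n >>> k))
    rw [Nat.shiftRight_xor_distrib]
  · show ((((m ^^^ n) >>> k : Nat)) : Int) = (((m >>> k) ^^^ (n >>> k) : Nat) : Int)
    rw [Nat.shiftRight_xor_distrib]

-- the key identity: masked-window xor of the two ciphertexts is the window of the xor
lemma key (a b : Int) (k j : Nat) :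
    PySem.Int.bxor (PySem.Int.band (Int.shiftRight a k) ((2 ^ j : Int) - 1)) (PySem.Int.band (Int.shiftRight b k) ((2 ^ j : Int) - 1))
      = PySem.Int.band (Int.shiftRight (PySem.Int.bxor a b) k) ((2 ^ j : Int) - 1) := by
  rw [band_mask, band_mask, band_mask, bxor_eq_xor, bxor_eq_xor, ← xor_emod, xor_shiftRight]

lemma key15 (a b : Int) (k : Nat) :
    PySem.Int.bxor (PySem.Int.band (Int.shiftRight a k) 15) (PySem.Int.band (Int.shiftRight b k) 15)
      = PySem.Int.band (Int.shiftRight (PySem.Int.bxor a b) k) 15 := by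
  have h := key a b k 4; norm_num at h; exact h

lemma key7 (a b : Int) (k : Nat) :
    PySem.Int.bxor (PySem.Int.band (Int.shiftRight a k) 7) (PySem.Int.band (Int.shiftRight b k) 7)
      = PySem.Int.band (Int.shiftRight (PySem.Int.bxor a b) k) 7 := by
  have h := key a b k 3; norm_num at h; exact h

lemma key3 (a b : Int) (k : Nat) :
    PySem.Int.bxor (PySem.Int.band (Int.shiftRight a k) 3) (PySem.Int.band (Int.shiftRight b k) 3)
      = PySem.Int.band (Int.shiftRight (PySem.Int.bxor a b) k) 3 := by
  have h := key a b k 2; norm_num at h; exact h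

lemma key1 (a b : Int) (k : Nat) :
    PySem.Int.bxor (PySem.Int.band (Int.shiftRight a k) 1) (PySem.Int.band (Int.shiftRight b k) 1)
      = PySem.Int.band (Int.shiftRight (PySem.Int.bxor a b) k) 1 := by
  have h := key a b k 1; norm_num at h; exact h

-- Python '>> k' is floor division by 2^k
lemma shiftRight_eq (a : Int) (k : Nat) : Int.shiftRight a k = a / ((2 ^ k : Nat) : Int) :=
  Int.shiftRight_eq_div_pow a k

-- mask numerals as emod
lemma band1 (x : Int) : PySem.Int.band x 1 = x % 2 := by
  have h := band_mask x 1; norm_num at h; exact h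

lemma band3 (x : Int) : PySem.Int.band x 3 = x % 4 := by
  have h := band_mask x 2; norm_num at h; exact h

lemma band7 (x : Int) : PySem.Int.band x 7 = x % 8 := by
  have h := band_mask x 3; norm_num at h; exact h

lemma band15 (x : Int) : PySem.Int.band x 15 = x % 16 := by
  have h := band_mask x 4; norm_num at h; exact h

-- PySem floor mod/div by positive numerals
lemma pymod2 (a : Int) : PySem.Int.mod a 2 = a % 2 := PySem.Int.mod_eq_emod_of_pos (by norm_num)
lemma pymod65536 (a : Int) : PySem.Int.mod a 65536 = a % 65536 := PySem.Int.mod_eq_emod_of_pos (by norm_num)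
lemma pydiv2 (a : Int) : PySem.Int.floordiv a 2 = a / 2 := PySem.Int.floordiv_eq_ediv_of_pos (by norm_num)

-- collapse of successive floor divisions
lemma dd (x : Int) {a b : Int} (h : 0 ≤ a) : (x / a) / b = x / (a * b) :=
  Int.ediv_ediv_of_nonneg h

-- the low 16 bits of x % 65536 are the low 16 bits of x
lemma br (x : Int) {c : Int} (h1 : 0 < c) (h2 : c * 2 ∣ 65536) :
    ((x % 65536) / c) % 2 = (x / c) % 2 := by
  obtain ⟨k, hk⟩ := h2
  have hd : x % 65536 + 65536 * (x / 65536) = x := Int.emod_add_ediv x 65536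
  have h4 : x / c = (x % 65536) / c + 2 * (k * (x / 65536)) := by
    have hx : x = x % 65536 + c * (2 * k * (x / 65536)) := by
      linear_combination (-1 : Int) * hd + (x / 65536) * hk
    conv_lhs => rw [hx]
    rw [Int.add_mul_ediv_left _ _ (by omega)]
    ring
  rw [h4, Int.add_mul_emod_self_left]

-- binary digit expansions of small moduli
lemma dig2 (x : Int) : x % 4 = x % 2 + 2 * ((x / 2) % 2) := by omega
lemma dig3 (x : Int) : x % 8 = x % 2 + 2 * ((x / 2) % 2) + 4 * ((x / 4) % 2) := by omega
lemma dig4 (x : Int) : x % 16 = x % 2 + 2 * ((x / 2) % 2) + 4 * ((x / 4) % 2) + 8 * ((x / 8) % 2) := by omega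

-- bin(x % 16).count('1') is the bit sum of the low nibble
lemma hwA (x : Int) :
    ((PySem.Str.count (PySem.Int.pyBin (x % 16)) "1" : Nat) : Int)
      = x % 2 + (x / 2) % 2 + (x / 4) % 2 + (x / 8) % 2 := by
  have e1 : x % 2 = (x % 16) % 2 := by omega
  have e2 : (x / 2) % 2 = ((x % 16) / 2) % 2 := by omega
  have e3 : (x / 4) % 2 = ((x % 16) / 4) % 2 := by omega
  have e4 : (x / 8) % 2 = ((x % 16) / 8) % 2 := by omega
  rw [e1, e2, e3, e4]
  have h0 : 0 ≤ x % 16 := Int.emod_nonneg x (by norm_num)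
  have h1 : x % 16 < 16 := Int.emod_lt_of_pos x (by norm_num)
  interval_cases (x % 16) <;> decide

-- bitwise and of two low nibbles is the sum of the bit products
lemma corrA (x y : Int) :
    PySem.Int.band (x % 16) (y % 16)
      = x % 2 * (y % 2) + 2 * ((x / 2) % 2 * ((y / 2) % 2))
        + 4 * ((x / 4) % 2 * ((y / 4) % 2)) + 8 * ((x / 8) % 2 * ((y / 8) % 2)) := by
  have e1 : x % 2 = (x % 16) % 2 := by omega
  have e2 : (x / 2) % 2 = ((x % 16) / 2) % 2 := by omega
  have e3 : (x / 4) % 2 = ((x % 16) / 4) % 2 := by omega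
  have e4 : (x / 8) % 2 = ((x % 16) / 8) % 2 := by omega
  have f1 : y % 2 = (y % 16) % 2 := by omega
  have f2 : (y / 2) % 2 = ((y % 16) / 2) % 2 := by omega
  have f3 : (y / 4) % 2 = ((y % 16) / 4) % 2 := by omega
  have f4 : (y / 8) % 2 = ((y % 16) / 8) % 2 := by omega
  rw [e1, e2, e3, e4, f1, f2, f3, f4]
  have hx0 : 0 ≤ x % 16 := Int.emod_nonneg x (by norm_num)
  have hx1 : x % 16 < 16 := Int.emod_lt_of_pos x (by norm_num)
  have hy0 : 0 ≤ y % 16 := Int.emod_nonneg y (by norm_num)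
  have hy1 : y % 16 < 16 := Int.emod_lt_of_pos y (by norm_num)
  interval_cases (x % 16) <;> interval_cases (y % 16) <;> decide

-- ===== VERDICT (by name: the statement is the Claim_ definition above) =====
set_option maxHeartbeats 1000000 in
theorem enhanced_extract_features_spec : Claim_equal_enhanced_extract_features := by
  intro c1 c2 _
  show enhanced_extract_features c1 c2 = enhanced_extract_features_alt c1 c2
  simp only [enhanced_extract_features, enhanced_extract_features_alt,
    show PySem.List.pyRange 0 4 1 = [0, 1, 2, 3] from rfl,
    show PySem.List.pyRange 0 16 1 = [0, 1, 2, 3, 4, 5, 6, 7, 8, 9, 10, 11, 12, 13, 14, 15] from rfl,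
    show PySem.List.pyRange 0 15 1 = [0, 1, 2, 3, 4, 5, 6, 7, 8, 9, 10, 11, 12, 13, 14] from rfl,
    show PySem.List.pyRange 0 14 1 = [0, 1, 2, 3, 4, 5, 6, 7, 8, 9, 10, 11, 12, 13] from rfl,
    show PySem.List.pyRange 1 4 1 = [1, 2, 3] from rfl,
    show PySem.List.pyRange 2 4 1 = [2, 3] from rfl,
    show PySem.List.pyRange 3 4 1 = [3] from rfl,
    show PySem.List.pyRange 4 4 1 = [] from rfl,
    List.foldl, List.map, List.zip, List.zipWith, List.reverse, List.reverseAux,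
    List.append_assoc, List.cons_append, List.nil_append,
    PySem.List.enumerate, PySem.List.slice, PySem.List.clampIdx, pvVal,
    List.length, List.take, List.drop,
    reduceIte, Nat.reduceAdd, Nat.reduceSub, Nat.min_def, Nat.reduceLeDiff, Nat.cast_ofNat,
    Int.reduceLT, Int.reduceMul, Int.reduceAdd, Int.reduceToNat]
  simp only [key15, key7, key3, key1]
  simp only [pymod2, pymod65536, pydiv2]
  simp only [band1, band3, band7, band15]
  simp only [hwA, corrA]
  simp only [shiftRight_eq, Nat.reducePow, Nat.cast_ofNat]
  simp [dd]
  simp [br]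
  simp only [dig2, dig3, dig4]
  simp [dd]
  ring_nf
  simp
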